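-- pv_equiv track=rewrite | github.com/alexanderlopez/lambda_calculus_evaluator | evaluator.py | getSpace
-- ===== SOURCE A (Python) =====
-- def getSpace(string):
--     strlen = len(string)
--     depth = 0
--     for x in range(1, strlen + 1):
--         curChar = string[strlen - x]
--
--         match curChar:
--             case ')':
--                 depth += 1
--             case '(':
--                 depth -= 1
--             case ' ':
--                 if depth == 0:
--                     return (strlen - x)
--
--     return -1
-- ===== SOURCE B (Python) =====
-- def getSpace(string):
--     net = string.count('(') - string.count(')')
--     depth = 0
--     last = -1
--     for i, c in enumerate(string):
--         if c == '(':
--             depth += 1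
--         elif c == ')':
--             depth -= 1
--         elif c == ' ' and depth == net:
--             last = i
--     return last
-- ===== Notes on version B (the rewrite author's own statement) =====
-- stated objective: alternative
-- what changed: A scans the string backward with an early return at the first space whose right-side parenthesis depth is zero; B makes a forward single pass, precomputing the net balance with str.count and recording the last space index whose left-to-right depth equals that net balance.
import Mathlib
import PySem

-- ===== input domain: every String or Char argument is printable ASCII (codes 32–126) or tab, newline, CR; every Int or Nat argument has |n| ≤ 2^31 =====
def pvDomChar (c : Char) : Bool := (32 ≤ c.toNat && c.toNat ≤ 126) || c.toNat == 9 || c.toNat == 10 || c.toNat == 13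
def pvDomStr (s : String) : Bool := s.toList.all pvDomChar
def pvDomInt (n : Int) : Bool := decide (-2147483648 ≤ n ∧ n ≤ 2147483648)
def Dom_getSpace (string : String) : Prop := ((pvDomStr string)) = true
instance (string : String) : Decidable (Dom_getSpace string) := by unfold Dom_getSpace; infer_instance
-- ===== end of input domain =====

-- B replaces A's backward early-return scan by a forward single pass that records the last space
-- seen at depth equal to the string's net parenthesis balance (same result, different decomposition).

-- ===== PORT A =====
-- A scans indices strlen-1 … 0 (x = 1 … strlen), tracking depth of the suffix, returning on the
-- first top-level space.  The `none` branch of pyGet? (IndexError) is unreachable: 1 ≤ x ≤ strlen.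
def getSpaceAux (s : List Char) (strlen : Int) (depth : Int) : List Int → Int
  | [] => -1
  | x :: xs =>
    match PySem.List.pyGet? s (strlen - x) with
    | none => -1   -- unreachable (index always in range)
    | some curChar =>
      if curChar = ')' then getSpaceAux s strlen (depth + 1) xs
      else if curChar = '(' then getSpaceAux s strlen (depth - 1) xs
      else if curChar = ' ' then
        (if depth = 0 then strlen - x else getSpaceAux s strlen depth xs)
      else getSpaceAux s strlen depth xs

def getSpace (string : String) : Int :=
  let s := string.toList
  let strlen : Int := s.length
  getSpaceAux s strlen 0 (PySem.List.pyRange 1 (strlen + 1) 1)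

-- ===== PORT B =====
-- forward fold over the characters, state = (index, depth, last recorded index)
def getSpaceStep (net : Int) (st : Int × Int × Int) (c : Char) : Int × Int × Int :=
  if c = '(' then (st.1 + 1, st.2.1 + 1, st.2.2)
  else if c = ')' then (st.1 + 1, st.2.1 - 1, st.2.2)
  else if c = ' ' ∧ st.2.1 = net then (st.1 + 1, st.2.1, st.1)
  else (st.1 + 1, st.2.1, st.2.2)

def getSpace_alt (string : String) : Int :=
  let net : Int := (PySem.Str.count string "(" : Int) - (PySem.Str.count string ")" : Int)
  (string.toList.foldl (getSpaceStep net) (0, 0, -1)).2.2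

-- ===== PRECONDITION & SPEC =====
def Spec_getSpace (string : String) (out : Int) : Prop := out = getSpace_alt string
instance (string : String) (out : Int) : Decidable (Spec_getSpace string out) := by unfold Spec_getSpace; infer_instance

-- ===== CLAIM (what is proved, stated in full; the proofs are below) =====
def Claim_equal_getSpace : Prop := ∀ (string : String), Dom_getSpace string → Spec_getSpace string (getSpace string)

-- ===== LEMMAS AND PROOFS =====

-- contribution of one character to the left-to-right parenthesis balance
def pvIota (c : Char) : Int := if c = '(' then 1 else if c = ')' then -1 else 0

def pvBal : List Char → Int
  | [] => 0
  | c :: t => pvIota c + pvBal t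

-- reference recursion for B's fold, state made explicit
def pvMgo (net : Int) : Int → Int → Int → List Char → Int
  | _, _, l0, [] => l0
  | i0, d0, l0, c :: rest =>
    if c = '(' then pvMgo net (i0 + 1) (d0 + 1) l0 rest
    else if c = ')' then pvMgo net (i0 + 1) (d0 - 1) l0 rest
    else if c = ' ' ∧ d0 = net then pvMgo net (i0 + 1) d0 i0 rest
    else pvMgo net (i0 + 1) d0 l0 rest

-- reference recursion for A's loop: argument list is the REVERSED string, idx the original index of its head
def pvE : List Char → Int → Int → Int
  | [], _, _ => -1
  | c :: r, idx, depth =>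
    if c = ')' then pvE r (idx - 1) (depth + 1)
    else if c = '(' then pvE r (idx - 1) (depth - 1)
    else if c = ' ' then (if depth = 0 then idx else pvE r (idx - 1) depth)
    else pvE r (idx - 1) depth

theorem pvBal_append (l : List Char) (c : Char) : pvBal (l ++ [c]) = pvBal l + pvIota c := by
  induction l with
  | nil => simp [pvBal]
  | cons h t ih => simp [pvBal, ih]; ring

theorem pvBal_counts (l : List Char) :
    pvBal l = (l.count '(' : Int) - (l.count ')' : Int) := by
  induction l with
  | nil => simp [pvBal]
  | cons h t ih =>
    by_cases h1 : h = '(' <;> by_cases h2 : h = ')' <;>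
      simp [pvBal, pvIota, h1, h2, ih] <;> omega

theorem count_go_singleton (c : Char) : ∀ (fuel : Nat) (l : List Char) (acc : Nat),
    l.length ≤ fuel → PySem.Chars.count.go [c] fuel l acc = acc + l.count c := by
  intro fuel
  induction fuel with
  | zero =>
    intro l acc h
    cases l with
    | nil => simp [PySem.Chars.count.go]
    | cons hd t => simp at h
  | succ f ih =>
    intro l acc h
    cases l with
    | nil => simp [PySem.Chars.count.go]
    | cons hd t =>
      have hpre : [c].isPrefixOf (hd :: t) = (c == hd) := by
        simp [List.isPrefixOf]
      by_cases hc : c = hd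
      · subst hc
        have hd1 : List.drop [c].length (c :: t) = t := by simp
        simp only [PySem.Chars.count.go]
        rw [if_pos (by simp [List.isPrefixOf]), hd1, ih t (acc + 1) (by simpa using h)]
        simp []
        omega
      · simp only [PySem.Chars.count.go]
        rw [if_neg (by simp [List.isPrefixOf, hc]), ih t acc (by simpa using h)]
        simp [Ne.symm hc]

theorem chars_count_singleton (l : List Char) (c : Char) :
    PySem.Chars.count l [c] = l.count c := by
  have := count_go_singleton c l.length l 0 le_rfl
  simp [PySem.Chars.count, this]

theorem foldl_step_eq_pvMgo (net : Int) :
    ∀ (cs : List Char) (i0 d0 l0 : Int),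
      (cs.foldl (getSpaceStep net) (i0, d0, l0)).2.2 = pvMgo net i0 d0 l0 cs := by
  intro cs
  induction cs with
  | nil => intro i0 d0 l0; simp [pvMgo]
  | cons c rest ih =>
    intro i0 d0 l0
    simp only [List.foldl_cons, getSpaceStep, pvMgo]
    split_ifs with h1 h2 h3 <;> simp [ih]

theorem pvMgo_append (net : Int) :
    ∀ (rest : List Char) (c : Char) (i0 d0 l0 : Int),
      pvMgo net i0 d0 l0 (rest ++ [c]) =
        if c = ' ' ∧ d0 + pvBal rest = net then i0 + rest.length
        else pvMgo net i0 d0 l0 rest := by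
  intro rest
  induction rest with
  | nil =>
    intro c i0 d0 l0
    simp only [List.nil_append, pvBal, add_zero, List.length_nil]
    by_cases hc1 : c = '('
    · rw [if_neg (fun hq => by rw [hc1] at hq; exact absurd hq.1 (by decide))]
      simp [pvMgo, hc1]
    · by_cases hc2 : c = ')'
      · rw [if_neg (fun hq => by rw [hc2] at hq; exact absurd hq.1 (by decide))]
        simp [pvMgo, hc2]
      · by_cases hc3 : c = ' ' ∧ d0 = net
        · rw [if_pos hc3]; simp [pvMgo, hc3.1, hc3.2]
        · rw [if_neg hc3]; simp [pvMgo, hc1, hc2, hc3]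
  | cons r rest' ih =>
    intro c i0 d0 l0
    by_cases h1 : r = '('
    · have e1 : pvMgo net i0 d0 l0 ((r :: rest') ++ [c]) =
          pvMgo net (i0 + 1) (d0 + 1) l0 (rest' ++ [c]) := by simp [pvMgo, h1]
      have e2 : pvMgo net i0 d0 l0 (r :: rest') =
          pvMgo net (i0 + 1) (d0 + 1) l0 rest' := by simp [pvMgo, h1]
      have hbal : pvBal (r :: rest') = 1 + pvBal rest' := by simp [pvBal, pvIota, h1]
      rw [e1, ih, e2, hbal]
      by_cases hsp : c = ' ' ∧ d0 + (1 + pvBal rest') = net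
      · rw [if_pos hsp, if_pos ⟨hsp.1, by omega⟩]
        simp only [List.length_cons]; push_cast; ring
      · rw [if_neg hsp, if_neg (fun hq => hsp ⟨hq.1, by omega⟩)]
    · by_cases h2 : r = ')'
      · have e1 : pvMgo net i0 d0 l0 ((r :: rest') ++ [c]) =
            pvMgo net (i0 + 1) (d0 - 1) l0 (rest' ++ [c]) := by simp [pvMgo, h2]
        have e2 : pvMgo net i0 d0 l0 (r :: rest') =
            pvMgo net (i0 + 1) (d0 - 1) l0 rest' := by simp [pvMgo, h2]
        have hbal : pvBal (r :: rest') = -1 + pvBal rest' := by simp [pvBal, pvIota, h2]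
        rw [e1, ih, e2, hbal]
        by_cases hsp : c = ' ' ∧ d0 + (-1 + pvBal rest') = net
        · rw [if_pos hsp, if_pos ⟨hsp.1, by omega⟩]
          simp only [List.length_cons]; push_cast; ring
        · rw [if_neg hsp, if_neg (fun hq => hsp ⟨hq.1, by omega⟩)]
      · have hbal : pvBal (r :: rest') = pvBal rest' := by
          have : pvIota r = 0 := by simp [pvIota, h1, h2]
          simp [pvBal, this]
        by_cases h3 : r = ' ' ∧ d0 = net
        · have e1 : pvMgo net i0 d0 l0 ((r :: rest') ++ [c]) =
              pvMgo net (i0 + 1) d0 i0 (rest' ++ [c]) := by simp [pvMgo, h3.1, h3.2]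
          have e2 : pvMgo net i0 d0 l0 (r :: rest') =
              pvMgo net (i0 + 1) d0 i0 rest' := by simp [pvMgo, h3.1, h3.2]
          rw [e1, ih, e2, hbal]
          by_cases hsp : c = ' ' ∧ d0 + pvBal rest' = net
          · rw [if_pos hsp, if_pos hsp]
            simp only [List.length_cons]; push_cast; ring
          · rw [if_neg hsp, if_neg hsp]
        · have e1 : pvMgo net i0 d0 l0 ((r :: rest') ++ [c]) =
              pvMgo net (i0 + 1) d0 l0 (rest' ++ [c]) := by simp [pvMgo, h1, h2, h3]
          have e2 : pvMgo net i0 d0 l0 (r :: rest') =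
              pvMgo net (i0 + 1) d0 l0 rest' := by simp [pvMgo, h1, h2, h3]
          rw [e1, ih, e2, hbal]
          by_cases hsp : c = ' ' ∧ d0 + pvBal rest' = net
          · rw [if_pos hsp, if_pos hsp]
            simp only [List.length_cons]; push_cast; ring
          · rw [if_neg hsp, if_neg hsp]

theorem pvE_eq_pvMgo :
    ∀ (r : List Char) (depth : Int),
      pvE r ((r.length : Int) - 1) depth = pvMgo (pvBal r.reverse - depth) 0 0 (-1) r.reverse := by
  intro r
  induction r with
  | nil => intro depth; simp [pvE, pvMgo]
  | cons c r' ih =>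
    intro depth
    have hrev : (c :: r').reverse = r'.reverse ++ [c] := by simp
    have hidx : ((c :: r').length : Int) - 1 - 1 = (r'.length : Int) - 1 := by
      push_cast [List.length_cons]; ring
    by_cases h1 : c = ')'
    · have hb : pvIota c = -1 := by simp [pvIota, h1]
      have eL : pvE (c :: r') (((c :: r').length : Int) - 1) depth
          = pvE r' (((c :: r').length : Int) - 1 - 1) (depth + 1) := by simp [pvE, h1]
      rw [eL, hidx, hrev, pvMgo_append, pvBal_append,
        if_neg (fun hq => by rw [h1] at hq; exact absurd hq.1 (by decide)),
        show pvBal r'.reverse + pvIota c - depth = pvBal r'.reverse - (depth + 1) from by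
          rw [hb]; ring]
      exact ih (depth + 1)
    · by_cases h2 : c = '('
      · have hb : pvIota c = 1 := by simp [pvIota, h2]
        have eL : pvE (c :: r') (((c :: r').length : Int) - 1) depth
            = pvE r' (((c :: r').length : Int) - 1 - 1) (depth - 1) := by simp [pvE, h2]
        rw [eL, hidx, hrev, pvMgo_append, pvBal_append,
          if_neg (fun hq => by rw [h2] at hq; exact absurd hq.1 (by decide)),
          show pvBal r'.reverse + pvIota c - depth = pvBal r'.reverse - (depth - 1) from by
            rw [hb]; ring]
        exact ih (depth - 1)
      · by_cases h3 : c = ' '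
        · have hb : pvIota c = 0 := by simp [pvIota, h1, h2]
          by_cases h4 : depth = 0
          · have eL : pvE (c :: r') (((c :: r').length : Int) - 1) depth
                = ((c :: r').length : Int) - 1 := by simp [pvE, h3, h4]
            rw [eL, hrev, pvMgo_append, pvBal_append,
              if_pos ⟨h3, by rw [hb, h4]; ring⟩]
            push_cast [List.length_cons, List.length_reverse]; ring
          · have eL : pvE (c :: r') (((c :: r').length : Int) - 1) depth
                = pvE r' (((c :: r').length : Int) - 1 - 1) depth := by simp [pvE, h3, h4]
            rw [eL, hidx, hrev, pvMgo_append, pvBal_append,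
              if_neg (fun hq => h4 (by have h5 := hq.2; rw [hb] at h5; omega)),
              show pvBal r'.reverse + pvIota c - depth = pvBal r'.reverse - depth from by
                rw [hb]; ring]
            exact ih depth
        · have hb : pvIota c = 0 := by simp [pvIota, h1, h2]
          have eL : pvE (c :: r') (((c :: r').length : Int) - 1) depth
              = pvE r' (((c :: r').length : Int) - 1 - 1) depth := by simp [pvE, h1, h2, h3]
          rw [eL, hidx, hrev, pvMgo_append, pvBal_append,
            if_neg (fun hq => h3 hq.1),
            show pvBal r'.reverse + pvIota c - depth = pvBal r'.reverse - depth from by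
              rw [hb]; ring]
          exact ih depth

theorem getSpaceAux_eq_pvE (cs : List Char) :
    ∀ (m j : Nat) (depth : Int), j + m = cs.length →
      getSpaceAux cs (cs.length : Int) depth
          (PySem.List.pyRange ((j : Int) + 1) ((cs.length : Int) + 1) 1) =
        pvE (cs.reverse.drop j) ((cs.length : Int) - (j : Int) - 1) depth := by
  intro m
  induction m with
  | zero =>
    intro j depth hj
    rw [PySem.List.pyRange_one_eq_nil (by omega), List.drop_eq_nil_of_le (by simp; omega)]
    simp [getSpaceAux, pvE]
  | succ m ih =>
    intro j depth hj
    have hj' : j < cs.length := by omega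
    have hjr : j < cs.reverse.length := by simpa using hj'
    have hget : PySem.List.pyGet? cs ((cs.length : Int) - ((j : Int) + 1)) =
        some (cs.reverse[j]'hjr) := by
      rw [PySem.List.pyGet?_eq_some_getElem cs (i := (cs.length : Int) - ((j : Int) + 1))
            (by omega) (by omega)]
      rw [List.getElem_reverse]
      apply congrArg
      exact getElem_congr rfl (by omega) (by omega)
    rw [PySem.List.pyRange_one_cons (by omega)]
    simp only [getSpaceAux, hget]
    rw [List.drop_eq_getElem_cons hjr]
    simp only [pvE]
    have harith : ((cs.length : Int) - (j : Int) - 1) - 1 = (cs.length : Int) - ((j : Nat) + 1 : Nat) - 1 := by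
      push_cast; ring
    have hnext : ((j : Int) + 1) + 1 = (((j + 1 : Nat) : Int)) + 1 := by push_cast; ring
    split_ifs with h1 h2 h3 h4
    · rw [hnext, ih (j + 1) (depth + 1) (by omega), harith]
    · rw [hnext, ih (j + 1) (depth - 1) (by omega), harith]
    · omega
    · rw [hnext, ih (j + 1) depth (by omega), harith]
    · rw [hnext, ih (j + 1) depth (by omega), harith]

theorem net_eq_bal (s : String) :
    (PySem.Str.count s "(" : Int) - (PySem.Str.count s ")" : Int) = pvBal s.toList := by
  rw [pvBal_counts]
  have h1 : PySem.Str.count s "(" = s.toList.count '(' := by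
    rw [PySem.Str.count_eq]
    exact chars_count_singleton s.toList '('
  have h2 : PySem.Str.count s ")" = s.toList.count ')' := by
    rw [PySem.Str.count_eq]
    exact chars_count_singleton s.toList ')'
  rw [h1, h2]

-- ===== VERDICT (by name: the statement is the Claim_ definition above) =====
theorem getSpace_spec : Claim_equal_getSpace := by
  intro s _
  unfold Spec_getSpace getSpace getSpace_alt
  have hA := getSpaceAux_eq_pvE s.toList s.toList.length 0 0 (by omega)
  simp only [Nat.cast_zero, zero_add, List.drop_zero, sub_zero] at hA
  have hE := pvE_eq_pvMgo s.toList.reverse 0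
  simp only [List.reverse_reverse, List.length_reverse, sub_zero] at hE
  have hB := foldl_step_eq_pvMgo ((PySem.Str.count s "(" : Int) - (PySem.Str.count s ")" : Int)) s.toList 0 0 (-1)
  rw [net_eq_bal] at hB
  simp only []
  rw [net_eq_bal, hB, hA, hE]
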